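-- pv_equiv track=rewrite | github.com/Jake-Pullen/advent_of_code | 2023/5/part 2 solution.py | map_range
-- ===== SOURCE A (Python) =====
-- def map_range(rng, map):
--     # Initialize a list with the input range
--     ranges = [rng]
--     # Initialize an empty list to store the result ranges
--     result_range = []
--
--     # Process each range in the list
--     while ranges:
--         # Flag to check if a match was found in the map
--         matched = False
--         # Get the current range
--         start, end = rng = ranges.pop()
--
--         # Check each entry in the map
--         for src, delta in map:
--             # Case 1: The end of the current range is within the source range
--             if start < src[0] <= end <= src[1]:
--                 matched = True
--                 # Add the remaining part of the current range to the list
--                 ranges.append((start, src[0] - 1))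
--                 # Add the mapped range to the result
--                 result_range.append((src[0] + delta, end + delta))
--
--             # Case 2: The start of the current range is within the source range
--             elif src[0] <= start <= src[1] < end:
--                 matched = True
--                 # Add the remaining part of the current range to the list
--                 ranges.append((src[1] + 1, end))
--                 # Add the mapped range to the result
--                 result_range.append((start + delta, src[1] + delta))
--
--             # Case 3: The current range is entirely within the source range
--             elif src[0] <= start <= end <= src[1]:
--                 matched = True
--                 # Add the mapped range to the result
--                 result_range.append((start + delta, end + delta))
--
--             # Case 4: The current range entirely contains the source range
--             elif start < src[0] <= src[1] < end:
--                 matched = True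
--                 # Add the parts of the current range outside the source range to the list
--                 ranges.append((start, src[0] - 1))
--                 ranges.append((src[1] + 1, end))
--                 # Add the mapped range to the result
--                 result_range.append((src[0] + delta, src[1] + delta))
--
--         # If no match was found in the map, add the current range to the result
--         if not matched:
--             result_range.append(rng)
--
--     # Sort the result ranges
--     result_range.sort()
--
--     return result_range
-- ===== SOURCE B (Python) =====
-- def map_range(rng, map):
--     # Arithmetic-intersection decomposition: for each map entry compute the overlap
--     # [max(start,s0), min(end,s1)] with one test instead of A's four-branch chain;
--     # recurse on the conditional left/right leftovers; sort the combined list once.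
--     def walk(start, end):
--         pieces = []
--         rest = []
--         hit = False
--         for (s0, s1), d in map:
--             lo = max(start, s0)
--             hi = min(end, s1)
--             if start <= end and s0 <= s1 and lo <= hi:
--                 hit = True
--                 pieces.append((lo + d, hi + d))
--                 if start < s0:
--                     rest.append((start, s0 - 1))
--                 if s1 < end:
--                     rest.append((s1 + 1, end))
--         if not hit:
--             pieces.append((start, end))
--         for r in rest:
--             pieces += walk(*r)
--         return pieces
--     return sorted(walk(*rng))
-- ===== Notes on version B (the rewrite author's own statement) =====
-- stated objective: alternative
-- what changed: Replaces A's LIFO worklist with a four-branch overlap case chain by a recursive helper that computes each map entry's overlap arithmetically (lo=max(start,s0), hi=min(end,s1), one overlap test, conditional left/right leftover segments) and recurses on the leftovers, sorting the combined list once at the top.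
import Mathlib
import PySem

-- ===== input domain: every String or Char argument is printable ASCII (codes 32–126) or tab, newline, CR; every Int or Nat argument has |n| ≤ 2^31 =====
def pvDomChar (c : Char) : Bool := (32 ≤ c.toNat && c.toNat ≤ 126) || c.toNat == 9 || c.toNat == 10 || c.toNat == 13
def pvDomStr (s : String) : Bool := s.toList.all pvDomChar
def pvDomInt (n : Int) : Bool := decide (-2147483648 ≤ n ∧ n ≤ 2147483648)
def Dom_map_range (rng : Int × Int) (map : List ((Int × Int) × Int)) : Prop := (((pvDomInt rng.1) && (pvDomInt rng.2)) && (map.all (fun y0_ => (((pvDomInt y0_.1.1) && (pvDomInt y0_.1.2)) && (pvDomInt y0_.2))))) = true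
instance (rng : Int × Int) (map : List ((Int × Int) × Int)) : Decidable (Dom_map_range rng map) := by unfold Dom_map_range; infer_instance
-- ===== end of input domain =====

-- B replaces A's LIFO worklist with its four-branch overlap case chain by a recursive helper
-- that computes each map entry's overlap arithmetically (max/min, one test, conditional left/right
-- leftovers) and recurses on the leftovers, sorting the combined list once (objective: alternative).

-- Python tuple comparison = lexicographic order; the sort key used by both ports
def pvKey (p : Int × Int) : Lex (Int × Int) := toLex p

-- length measure of a range (used only for termination)
def pvLen (r : Int × Int) : Nat := (r.2 - r.1).toNat

-- ===== PORT A helpers =====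
-- what one iteration of A's for-loop body contributes for one map entry:
-- (appended to ranges, appended to result_range, matched set); the four cases in A's order
def caseA (start fin : Int) (e : (Int × Int) × Int) :
    List (Int × Int) × List (Int × Int) × Bool :=
  if start < e.1.1 ∧ e.1.1 ≤ fin ∧ fin ≤ e.1.2 then
    ([(start, e.1.1 - 1)], [(e.1.1 + e.2, fin + e.2)], true)
  else if e.1.1 ≤ start ∧ start ≤ e.1.2 ∧ e.1.2 < fin then
    ([(e.1.2 + 1, fin)], [(start + e.2, e.1.2 + e.2)], true)
  else if e.1.1 ≤ start ∧ start ≤ fin ∧ fin ≤ e.1.2 then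
    ([], [(start + e.2, fin + e.2)], true)
  else if start < e.1.1 ∧ e.1.1 ≤ e.1.2 ∧ e.1.2 < fin then
    ([(start, e.1.1 - 1), (e.1.2 + 1, fin)], [(e.1.1 + e.2, e.1.2 + e.2)], true)
  else ([], [], false)

-- one step of A's for-loop; state = (ranges, result_range, matched)
def stepA (start fin : Int) (st : List (Int × Int) × List (Int × Int) × Bool)
    (e : (Int × Int) × Int) :
    List (Int × Int) × List (Int × Int) × Bool :=
  (st.1 ++ (caseA start fin e).1, st.2.1 ++ (caseA start fin e).2.1,
   st.2.2 || (caseA start fin e).2.2)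

-- ===== PORT B helpers =====
-- what one iteration of B's scan contributes for one map entry: (mapped piece, leftovers, hit)
def caseW (start fin : Int) (e : (Int × Int) × Int) :
    List (Int × Int) × List (Int × Int) × Bool :=
  let lo := max start e.1.1
  let hi := min fin e.1.2
  if start ≤ fin ∧ e.1.1 ≤ e.1.2 ∧ lo ≤ hi then
    ([(lo + e.2, hi + e.2)],
     (if start < e.1.1 then [(start, e.1.1 - 1)] else [])
       ++ (if e.1.2 < fin then [(e.1.2 + 1, fin)] else []),
     true)
  else ([], [], false)

-- one step of B's scan; state = (pieces, rest, hit)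
def stepW (start fin : Int) (st : List (Int × Int) × List (Int × Int) × Bool)
    (e : (Int × Int) × Int) :
    List (Int × Int) × List (Int × Int) × Bool :=
  (st.1 ++ (caseW start fin e).1, st.2.1 ++ (caseW start fin e).2.1,
   st.2.2 || (caseW start fin e).2.2)

-- worklist measure for A's while-loop termination (C = 2*|map|+1)
def pvMu (C : Nat) (ranges : List (Int × Int)) : Nat :=
  (ranges.map (fun r => C ^ pvLen r)).sum

-- ==== lemmas cited by A's termination argument (stated before loopA, which names them) ====

-- a fold that appends per-entry contributions is the flatMap/any of those contributions
theorem fold_flat {α : Type} (c : α → List (Int × Int) × List (Int × Int) × Bool)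
    (entries : List α) :
    ∀ (o l : List (Int × Int)) (b : Bool),
      entries.foldl
          (fun st e => (st.1 ++ (c e).1, st.2.1 ++ (c e).2.1, st.2.2 || (c e).2.2))
          (o, l, b) =
        (o ++ entries.flatMap (fun e => (c e).1),
         l ++ entries.flatMap (fun e => (c e).2.1),
         b || entries.any (fun e => (c e).2.2)) := by
  induction entries with
  | nil => intro o l b; simp
  | cons e es ih =>
    intro o l b
    rw [List.foldl_cons, ih]
    simp [Bool.or_assoc]

theorem caseA_lo (start fin : Int) (e : (Int × Int) × Int) :
    (∀ p ∈ (caseA start fin e).1, pvLen p < pvLen (start, fin)) ∧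
      (caseA start fin e).1.length ≤ 2 := by
  unfold caseA pvLen
  split_ifs <;> simp <;> omega

theorem flat_lo {α : Type} (g : α → List (Int × Int)) (r : Int × Int)
    (entries : List α) (h : ∀ e, (∀ p ∈ g e, pvLen p < pvLen r) ∧ (g e).length ≤ 2) :
    (∀ p ∈ entries.flatMap g, pvLen p < pvLen r) ∧
      (entries.flatMap g).length ≤ 2 * entries.length := by
  induction entries with
  | nil => simp
  | cons e es ih =>
    simp only [List.flatMap_cons, List.mem_append, List.length_append, List.length_cons]
    exact ⟨fun p hp => hp.elim ((h e).1 p) (ih.1 p), by have := (h e).2; have := ih.2; omega⟩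

theorem pvSum_le (C K : Nat) (L : List (Int × Int))
    (hb : ∀ q ∈ L, C ^ pvLen q ≤ C ^ K) :
    (L.map (fun p => C ^ pvLen p)).sum ≤ L.length * C ^ K := by
  induction L with
  | nil => simp
  | cons a t iht =>
    simp only [List.map_cons, List.sum_cons, List.length_cons]
    have h1 := hb a (by simp)
    have h2 := iht (fun q hq => hb q (by simp [hq]))
    calc C ^ pvLen a + (t.map (fun p => C ^ pvLen p)).sum
        ≤ C ^ K + t.length * C ^ K := by omega
      _ = (t.length + 1) * C ^ K := by ring

theorem pvMu_lt (C : Nat) (hC : 1 ≤ C) (r : Int × Int) (rest lo : List (Int × Int))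
    (hlen : ∀ p ∈ lo, pvLen p < pvLen r) (hcnt : lo.length < C) :
    pvMu C (rest ++ lo) < pvMu C (rest ++ [r]) := by
  have hsum : (lo.map (fun p => C ^ pvLen p)).sum < C ^ pvLen r := by
    rcases lo with _ | ⟨p0, lo'⟩
    · simpa using Nat.one_le_pow _ _ hC
    · have hL : 1 ≤ pvLen r := Nat.one_le_iff_ne_zero.mpr (by
        have := hlen p0 (by simp); omega)
      have hbound : ∀ q ∈ p0 :: lo', C ^ pvLen q ≤ C ^ (pvLen r - 1) := by
        intro q hq
        exact Nat.pow_le_pow_right hC (by have := hlen q hq; omega)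
      have hsum_le := pvSum_le C (pvLen r - 1) (p0 :: lo') hbound
      have hpow : 0 < C ^ (pvLen r - 1) := Nat.pow_pos (by omega)
      calc ((p0 :: lo').map (fun p => C ^ pvLen p)).sum
          ≤ (p0 :: lo').length * C ^ (pvLen r - 1) := hsum_le
        _ < C * C ^ (pvLen r - 1) := Nat.mul_lt_mul_of_lt_of_le hcnt (le_refl _) hpow
        _ = C ^ pvLen r := by rw [← Nat.pow_succ']; congr 1; omega
  unfold pvMu
  simp only [List.map_append, List.sum_append, List.map_cons, List.map_nil, List.sum_cons,
    List.sum_nil]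
  omega

-- the measure decrease A's recursion cites, packaged as one lemma
theorem loopA_dec (mp : List ((Int × Int) × Int)) (ranges result : List (Int × Int))
    (h : ¬ ranges = []) :
    pvMu (2 * mp.length + 1)
        (mp.foldl (stepA (ranges.getLast h).1 (ranges.getLast h).2)
          (ranges.dropLast, result, false)).1 <
      pvMu (2 * mp.length + 1) ranges := by
  rw [show stepA (ranges.getLast h).1 (ranges.getLast h).2 =
      (fun st e => (st.1 ++ (caseA (ranges.getLast h).1 (ranges.getLast h).2 e).1,
        st.2.1 ++ (caseA (ranges.getLast h).1 (ranges.getLast h).2 e).2.1,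
        st.2.2 || (caseA (ranges.getLast h).1 (ranges.getLast h).2 e).2.2)) from rfl,
    fold_flat]
  conv_rhs => rw [← List.dropLast_append_getLast h]
  have hb := flat_lo (fun e => (caseA (ranges.getLast h).1 (ranges.getLast h).2 e).1)
    (ranges.getLast h) mp
    (fun e => caseA_lo (ranges.getLast h).1 (ranges.getLast h).2 e)
  exact pvMu_lt (2 * mp.length + 1) (by omega) (ranges.getLast h) ranges.dropLast _
    hb.1 (by have := hb.2; omega)

-- ===== PORT A =====
-- A's while-loop: pop the last range, fold the for-loop over map, push leftovers, repeat;
-- sort the accumulated result when the worklist is empty.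
def loopA (mp : List ((Int × Int) × Int)) (ranges result : List (Int × Int)) :
    List (Int × Int) :=
  if h : ranges = [] then PySem.List.sorted result pvKey false
  else
    let r := ranges.getLast h
    let st := mp.foldl (stepA r.1 r.2) (ranges.dropLast, result, false)
    loopA mp st.1 (if st.2.2 then st.2.1 else st.2.1 ++ [r])
termination_by pvMu (2 * mp.length + 1) ranges
decreasing_by simp only [List.foldl_attach]; exact loopA_dec mp ranges result h

def map_range (rng : Int × Int) (map : List ((Int × Int) × Int)) : List (Int × Int) :=
  loopA map [rng] []

-- ===== PORT B =====
-- B's recursive helper: scan the map once for this range, then recurse on each leftover.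
-- fuel (> pvLen rng suffices, see walkB_fuel below) only makes the recursion structural.
def walkB (fuel : Nat) (mp : List ((Int × Int) × Int)) (rng : Int × Int) :
    List (Int × Int) :=
  match fuel with
  | 0 => []
  | fuel + 1 =>
    let st := mp.foldl (stepW rng.1 rng.2) ([], [], false)
    let pieces := if st.2.2 then st.1 else st.1 ++ [rng]
    pieces ++ st.2.1.flatMap (walkB fuel mp)

def map_range_alt (rng : Int × Int) (map : List ((Int × Int) × Int)) : List (Int × Int) :=
  PySem.List.sorted (walkB (pvLen rng + 1) map rng) pvKey false

-- ===== PRECONDITION & SPEC =====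
def Spec_map_range (rng : Int × Int) (map : List ((Int × Int) × Int)) (out : List (Int × Int)) : Prop := out = map_range_alt rng map
instance (rng : Int × Int) (map : List ((Int × Int) × Int)) (out : List (Int × Int)) : Decidable (Spec_map_range rng map out) := by unfold Spec_map_range; infer_instance

-- ===== CLAIM (what is proved, stated in full; the proofs are below) =====
def Claim_equal_map_range : Prop := ∀ (rng : Int × Int) (map : List ((Int × Int) × Int)), Dom_map_range rng map → Spec_map_range rng map (map_range rng map)

-- ===== LEMMAS AND PROOFS =====

theorem pvKey_injective : Function.Injective pvKey := fun _ _ h => toLex.injective h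

-- A's four-branch case chain coincides, with the components swapped, with B's arithmetic
-- overlap computation
theorem caseA_eq_swap (start fin : Int) (e : (Int × Int) × Int) :
    caseA start fin e =
      ((caseW start fin e).2.1, (caseW start fin e).1, (caseW start fin e).2.2) := by
  unfold caseA caseW
  dsimp only
  split_ifs <;>
    first
      | rfl
      | (exfalso; omega)
      | (simp only [List.cons_append, List.nil_append, Prod.mk.injEq, List.cons.injEq,
          and_true, true_and];
          refine ⟨?_, ?_⟩ <;> try refine ⟨?_, ?_⟩) <;> first | rfl | omega

theorem caseW_lo (start fin : Int) (e : (Int × Int) × Int) :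
    (∀ p ∈ (caseW start fin e).2.1, pvLen p < pvLen (start, fin)) ∧
      (caseW start fin e).2.1.length ≤ 2 := by
  have h := caseA_lo start fin e
  rw [caseA_eq_swap] at h
  exact h

-- per-range data of B's scan: mapped pieces, leftovers, hit flag
def pvOW (mp : List ((Int × Int) × Int)) (r : Int × Int) : List (Int × Int) :=
  mp.flatMap (fun e => (caseW r.1 r.2 e).1)
def pvLW (mp : List ((Int × Int) × Int)) (r : Int × Int) : List (Int × Int) :=
  mp.flatMap (fun e => (caseW r.1 r.2 e).2.1)
def pvHW (mp : List ((Int × Int) × Int)) (r : Int × Int) : Bool :=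
  mp.any (fun e => (caseW r.1 r.2 e).2.2)

theorem walkB_succ (n : Nat) (mp : List ((Int × Int) × Int)) (r : Int × Int) :
    walkB (n + 1) mp r =
      (if pvHW mp r then pvOW mp r else pvOW mp r ++ [r]) ++
        (pvLW mp r).flatMap (walkB n mp) := by
  rw [walkB]
  rw [show stepW r.1 r.2 =
      (fun st e => (st.1 ++ (caseW r.1 r.2 e).1, st.2.1 ++ (caseW r.1 r.2 e).2.1,
        st.2.2 || (caseW r.1 r.2 e).2.2)) from rfl, fold_flat]
  simp only [List.nil_append, Bool.false_or]
  rfl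

theorem pvLW_lt (mp : List ((Int × Int) × Int)) (r : Int × Int) :
    ∀ q ∈ pvLW mp r, pvLen q < pvLen r := by
  intro q hq
  rcases List.mem_flatMap.mp hq with ⟨e, _, hqe⟩
  exact (caseW_lo r.1 r.2 e).1 q hqe

theorem pvLW_len (mp : List ((Int × Int) × Int)) (r : Int × Int) :
    (pvLW mp r).length ≤ 2 * mp.length :=
  (flat_lo (fun e => (caseW r.1 r.2 e).2.1) r mp (fun e => caseW_lo r.1 r.2 e)).2

-- the fuel does not matter once it exceeds the range length
theorem walkB_fuel (mp : List ((Int × Int) × Int)) :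
    ∀ (n m : Nat) (r : Int × Int), pvLen r < n → pvLen r < m →
      walkB n mp r = walkB m mp r := by
  intro n
  induction n with
  | zero => intro m r hn; omega
  | succ n ih =>
    intro m r hn hm
    cases m with
    | zero => omega
    | succ m =>
      rw [walkB_succ, walkB_succ]
      congr 1
      refine List.flatMap_congr (fun q hq => ?_)
      have hlt := pvLW_lt mp r q hq
      exact ih m q (by omega) (by omega)

-- one unfolding of B's helper at its canonical fuel
theorem walkB_unfold (mp : List ((Int × Int) × Int)) (r : Int × Int) :
    walkB (pvLen r + 1) mp r =
      (if pvHW mp r then pvOW mp r else pvOW mp r ++ [r]) ++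
        (pvLW mp r).flatMap (fun q => walkB (pvLen q + 1) mp q) := by
  rw [walkB_succ]
  congr 1
  refine List.flatMap_congr (fun q hq => ?_)
  have hlt := pvLW_lt mp r q hq
  exact walkB_fuel mp (pvLen r) (pvLen q + 1) q (by omega) (by omega)

-- A's loop computes, up to the final sort, the concatenation of B's splits
theorem loopA_eq (mp : List ((Int × Int) × Int)) (n : Nat) :
    ∀ (ranges result : List (Int × Int)), pvMu (2 * mp.length + 1) ranges ≤ n →
      loopA mp ranges result =
        PySem.List.sorted
          (result ++ ranges.flatMap (fun q => walkB (pvLen q + 1) mp q)) pvKey false := by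
  induction n with
  | zero =>
    intro ranges result hmu
    cases ranges with
    | nil => rw [loopA]; simp
    | cons a t =>
      exfalso
      have h1 : 1 ≤ (2 * mp.length + 1) ^ pvLen a := Nat.one_le_pow _ _ (by omega)
      have h2 : pvMu (2 * mp.length + 1) (a :: t) =
          (2 * mp.length + 1) ^ pvLen a + pvMu (2 * mp.length + 1) t := by
        simp [pvMu]
      omega
  | succ n ih =>
    intro ranges result hmu
    by_cases h : ranges = []
    · subst h; rw [loopA]; simp
    · rw [loopA]
      simp only [dif_neg h]
      set r := ranges.getLast h with hr
      have hsplit : ranges.dropLast ++ [r] = ranges := List.dropLast_append_getLast h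
      rw [show stepA r.1 r.2 =
          (fun st e => (st.1 ++ (caseA r.1 r.2 e).1, st.2.1 ++ (caseA r.1 r.2 e).2.1,
            st.2.2 || (caseA r.1 r.2 e).2.2)) from rfl, fold_flat]
      simp only [caseA_eq_swap, Bool.false_or]
      rw [show mp.flatMap (fun e => (caseW r.1 r.2 e).2.1) = pvLW mp r from rfl,
        show mp.flatMap (fun e => (caseW r.1 r.2 e).1) = pvOW mp r from rfl,
        show mp.any (fun e => (caseW r.1 r.2 e).2.2) = pvHW mp r from rfl]
      -- the new worklist is dropLast ++ leftovers; measure decreases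
      have hdec : pvMu (2 * mp.length + 1) (ranges.dropLast ++ pvLW mp r) <
          pvMu (2 * mp.length + 1) ranges := by
        conv_rhs => rw [← hsplit]
        exact pvMu_lt _ (by omega) r _ _ (pvLW_lt mp r)
          (by have := pvLW_len mp r; omega)
      rw [ih _ _ (by omega)]
      apply PySem.List.sorted_eq_sorted_of_perm _ _ _ pvKey_injective
      conv_rhs => rw [← hsplit]
      simp only [List.flatMap_append, List.flatMap_cons, List.flatMap_nil, List.append_nil]
      rw [walkB_unfold]
      rw [← Multiset.coe_eq_coe]
      by_cases hm : pvHW mp r = true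
      · simp only [if_pos hm, ← Multiset.coe_add]
        abel
      · simp only [if_neg hm, ← Multiset.coe_add]
        abel

-- ===== VERDICT (by name: the statement is the Claim_ definition above) =====
theorem map_range_spec : Claim_equal_map_range := by
  intro rng mp _
  unfold Spec_map_range map_range map_range_alt
  rw [loopA_eq mp (pvMu (2 * mp.length + 1) [rng]) [rng] [] (le_refl _)]
  simp
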